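-- pv_equiv track=rewrite | github.com/alvanli/Chatty-V2 | Prelim_DataCleaning_2.py | lastCaps
-- ===== SOURCE A (Python) =====
-- def lastCaps(sentence):
--     caps = True
--     i = 1
--     while caps and len(sentence)>1 and i < 20:
--         if i == 19:
--             return ""
--         if sentence[-i:].isupper() and "?" not in sentence[-i:] and "." not in sentence[-i:] and "!" not in sentence[-i:]:
--             i += 1
--         else:
--             caps = False
--             if (i == 1):
--                 return ""
--             else:
--                 return sentence[-(i-1):]
-- ===== SOURCE B (Python) =====
-- def lastCaps(sentence):
--     # Single backward scan instead of A's repeated full-suffix .isupper() rescans.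
--     if len(sentence) <= 1:
--         return ""
--     if not ('A' <= sentence[-1] <= 'Z'):
--         return ""
--     m = 1
--     for c in reversed(sentence[:-1]):
--         if m >= 18:
--             return ""
--         if 'a' <= c <= 'z' or c in '?.!':
--             return sentence[-m:]
--         m += 1
--     return ""
-- ===== Notes on version B (the rewrite author's own statement) =====
-- stated objective: alternative
-- what changed: A re-tests the whole growing suffix with .isupper() and three substring searches on every iteration; B checks the last character once and then makes a single backward pass over the preceding characters, keeping only a running valid length.
-- outside the precondition, e.g. on lastCaps('A'): A returns None, B returns ''; on lastCaps(''): A returns None, B returns ''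
import Mathlib
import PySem

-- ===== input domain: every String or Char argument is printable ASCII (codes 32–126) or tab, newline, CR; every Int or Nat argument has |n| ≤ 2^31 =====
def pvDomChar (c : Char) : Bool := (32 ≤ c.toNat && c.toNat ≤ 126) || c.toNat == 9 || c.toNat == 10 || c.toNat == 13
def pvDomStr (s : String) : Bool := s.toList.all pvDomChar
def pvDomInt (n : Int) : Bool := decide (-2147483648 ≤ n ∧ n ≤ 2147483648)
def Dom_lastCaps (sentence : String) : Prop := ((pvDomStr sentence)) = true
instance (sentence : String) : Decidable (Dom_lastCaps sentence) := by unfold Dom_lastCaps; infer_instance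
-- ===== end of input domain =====

-- B replaces A's repeated full-suffix .isupper() rescans with a single backward character scan.

-- ===== PORT A =====
-- hand port of Python's str.isupper (PySem has only per-char predicates):
-- at least one cased character and no lowercase one; exact on the ASCII domain Dom_lastCaps,
-- where the cased characters are exactly 'A'-'Z' and 'a'-'z'.
def pyStrIsupper (cs : List Char) : Bool :=
  cs.any (fun c => ('A' ≤ c && c ≤ 'Z') || ('a' ≤ c && c ≤ 'z')) &&
  cs.all (fun c => !('a' ≤ c && c ≤ 'z'))

-- the while loop of A; `caps = False` happens only together with a return, so the loop state is i.
-- When the while condition fails, Python's A falls off the function and returns None (reachable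
-- only for len(sentence) ≤ 1, which Pre_lastCaps excludes); the port returns "" there.
def lastCapsLoop (s : List Char) (i : Nat) : String :=
  if h : i < 20 ∧ 1 < s.length then
    if i == 19 then ""
    else
      let suf := PySem.List.slice s (some (-(i : Int))) none
      if pyStrIsupper suf && !PySem.Chars.isIn ['?'] suf
          && !PySem.Chars.isIn ['.'] suf && !PySem.Chars.isIn ['!'] suf then
        lastCapsLoop s (i + 1)
      else if i == 1 then ""
      else String.ofList (PySem.List.slice s (some (-((i : Int) - 1))) none)
  else ""
termination_by 20 - i
decreasing_by omega

def lastCaps (sentence : String) : String :=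
  lastCapsLoop sentence.toList 1

-- ===== PORT B =====
-- the backward scan over reversed(sentence[:-1]) with running valid length m
def lastCapsAltLoop (s : List Char) (rest : List Char) (m : Nat) : String :=
  match rest with
  | [] => ""
  | c :: rest' =>
    if 18 ≤ m then ""
    else if ('a' ≤ c && c ≤ 'z') || c == '?' || c == '.' || c == '!' then
      String.ofList (PySem.List.slice s (some (-(m : Int))) none)
    else lastCapsAltLoop s rest' (m + 1)

def lastCaps_alt (sentence : String) : String :=
  let s := sentence.toList
  if s.length ≤ 1 then ""
  else
    match PySem.List.pyGet? s (-1) with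
    | none => ""   -- unreachable: s has length ≥ 2 here
    | some c0 =>
      if !('A' ≤ c0 && c0 ≤ 'Z') then ""
      else lastCapsAltLoop s s.dropLast.reverse 1

-- ===== PRECONDITION & SPEC =====
-- Pre_ excludes strings of length ≤ 1: there A's while loop never runs and A falls off the
-- function, returning None instead of a string; B returns "" there.
def Pre_lastCaps (sentence : String) : Prop := 2 ≤ sentence.toList.length
instance (sentence : String) : Decidable (Pre_lastCaps sentence) := by unfold Pre_lastCaps; infer_instance
def pvWitness_lastCaps : String := "OK"

def Spec_lastCaps (sentence : String) (out : String) : Prop := out = lastCaps_alt sentence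
instance (sentence : String) (out : String) : Decidable (Spec_lastCaps sentence out) := by unfold Spec_lastCaps; infer_instance

-- ===== CLAIM (what is proved, stated in full; the proofs are below) =====
def Claim_equal_lastCaps : Prop := ∀ (sentence : String), Dom_lastCaps sentence → Pre_lastCaps sentence → Spec_lastCaps sentence (lastCaps sentence)

-- ===== LEMMAS AND PROOFS =====

-- the continuation test of B, as a predicate: a character that keeps the suffix valid
def okChar (c : Char) : Bool := !(('a' ≤ c && c ≤ 'z') || c == '?' || c == '.' || c == '!')

theorem slice_neg_eq_take_reverse (s : List Char) (k : Nat) (hk : 0 < k) :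
    PySem.List.slice s (some (-(k : Int))) none = (s.reverse.take k).reverse := by
  rw [PySem.List.slice_some_none, PySem.List.clampIdx_neg_natCast _ _ hk, List.take_reverse,
    List.reverse_reverse]

theorem isIn_singleton (a : Char) (l : List Char) :
    PySem.Chars.isIn [a] l = l.contains a := by
  rcases h : PySem.Chars.isIn [a] l with _ | _
  · rw [PySem.Chars.isIn_eq_false_iff] at h
    simp [List.singleton_infix_iff] at h
    simp [h]
  · rw [PySem.Chars.isIn_iff_infix] at h
    simp [List.singleton_infix_iff] at h
    simp [h]

-- A's suffix test of length k, for an uppercase last character c0, is B's per-character test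
-- on the k-1 characters preceding c0 (read backwards)
theorem condA_eq (s : List Char) (k : Nat) (hk : 0 < k) (c0 : Char) (cr : List Char)
    (hrs : s.reverse = c0 :: cr) (hu : ('A' ≤ c0 && c0 ≤ 'Z') = true) :
    (pyStrIsupper (PySem.List.slice s (some (-(k : Int))) none)
      && !PySem.Chars.isIn ['?'] (PySem.List.slice s (some (-(k : Int))) none)
      && !PySem.Chars.isIn ['.'] (PySem.List.slice s (some (-(k : Int))) none)
      && !PySem.Chars.isIn ['!'] (PySem.List.slice s (some (-(k : Int))) none))
    = (cr.take (k - 1)).all okChar := by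
  obtain ⟨k', rfl⟩ : ∃ k', k = k' + 1 := ⟨k - 1, by omega⟩
  rw [slice_neg_eq_take_reverse _ _ hk, hrs]
  simp only [List.take_succ_cons, Nat.add_sub_cancel, isIn_singleton]
  have hn : 65 ≤ c0.toNat ∧ c0.toNat ≤ 90 := by
    simpa [Char.le_def, UInt32.le_iff_toNat_le] using hu
  have hq : '?' ≠ c0 := by rintro rfl; exact absurd hn (by decide)
  have hd : '.' ≠ c0 := by rintro rfl; exact absurd hn (by decide)
  have he : '!' ≠ c0 := by rintro rfl; exact absurd hn (by decide)
  have hl : ¬ ('a' ≤ c0) := by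
    simp [Char.le_def, UInt32.le_iff_toNat_le]; omega
  simp [pyStrIsupper, hu, hl, hq, hd, he, List.contains_eq_mem]
  rw [Bool.eq_iff_iff]
  simp [okChar, List.all_eq_true]
  constructor
  · rintro ⟨⟨⟨h1, h2⟩, h3⟩, h4⟩ c hc
    exact ⟨⟨⟨h1 c hc, fun h => h2 (h ▸ hc)⟩, fun h => h3 (h ▸ hc)⟩, fun h => h4 (h ▸ hc)⟩
  · intro h
    refine ⟨⟨⟨fun c hc => (h c hc).1.1.1, fun hc => (h _ hc).1.1.2 rfl⟩,
      fun hc => (h _ hc).1.2 rfl⟩, fun hc => (h _ hc).2 rfl⟩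

theorem altLoop_18 (s : List Char) (rest : List Char) : lastCapsAltLoop s rest 18 = "" := by
  cases rest <;> simp [lastCapsAltLoop]

-- loop correspondence: once the last character is known uppercase and the i-2 characters
-- before it are valid, A's loop from i behaves like B's loop at m = i-1
theorem loop_eq (s : List Char) (c0 : Char) (cr : List Char) (hs : 1 < s.length)
    (hrs : s.reverse = c0 :: cr) (hu : ('A' ≤ c0 && c0 ≤ 'Z') = true) :
    ∀ (n i : Nat), n = 19 - i → 2 ≤ i → i ≤ 19 → (cr.take (i - 2)).all okChar = true →
      lastCapsLoop s i = lastCapsAltLoop s (cr.drop (i - 2)) (i - 1) := by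
  intro n
  induction n with
  | zero =>
    intro i hn h2 h19 _
    have : i = 19 := by omega
    subst this
    rw [lastCapsLoop]
    simp only [hs, and_true]
    have h18 : (19:Nat) - 1 = 18 := by norm_num
    simp [h18, altLoop_18]
  | succ n ih =>
    intro i hn h2 h19 hinv
    have hi19 : i < 19 := by omega
    rw [lastCapsLoop]
    simp only
    rw [dif_pos ⟨by omega, hs⟩, if_neg (by simp; omega : ¬ (i == 19) = true)]
    rw [condA_eq s i (by omega) c0 cr hrs hu]
    rcases hdrop : cr.drop (i - 2) with _ | ⟨c, rest'⟩
    · -- cr exhausted: the condition stays true, both sides end in ""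
      have hcr : cr.length ≤ i - 2 := List.drop_eq_nil_iff.mp hdrop
      have hall : cr.all okChar = true := List.take_of_length_le hcr ▸ hinv
      rw [if_pos (by rw [List.take_of_length_le (by omega)]; exact hall)]
      rw [ih (i+1) (by omega) (by omega) (by omega)
        (by rw [List.take_of_length_le (by omega)]; exact hall)]
      rw [List.drop_eq_nil_iff.mpr (by omega : cr.length ≤ i + 1 - 2)]
      simp [lastCapsAltLoop]
    · have hlen : i - 2 < cr.length := by
        by_contra hc
        rw [List.drop_eq_nil_iff.mpr (by omega)] at hdrop
        exact absurd hdrop (by simp)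
      have hget : cr[i-2]? = some c := by
        rw [← List.head?_drop, hdrop]; rfl
      have htake : cr.take (i-1) = cr.take (i-2) ++ [c] := by
        rw [show i - 1 = (i-2) + 1 from by omega, List.take_add_one, hget]; rfl
      have hcond : (cr.take (i-1)).all okChar = okChar c := by
        rw [htake]; simp [hinv]
      rw [hcond]
      by_cases hok : okChar c = true
      · rw [if_pos hok]
        rw [ih (i+1) (by omega) (by omega) (by omega)
          (by rw [show i+1-2 = i-1 from by omega, htake]; simp [hinv, hok])]
        have hdrop' : cr.drop (i+1-2) = rest' := by
          have h := congrArg List.tail hdrop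
          rw [List.tail_drop] at h
          rw [show i+1-2 = i-2+1 from by omega]; exact h
        rw [hdrop']
        have htest : (('a' ≤ c && c ≤ 'z') || c == '?' || c == '.' || c == '!') = false := by
          revert hok; unfold okChar
          cases (('a' ≤ c && c ≤ 'z') || c == '?' || c == '.' || c == '!') <;> simp
        conv_rhs => rw [lastCapsAltLoop]
        rw [if_neg (by omega : ¬ 18 ≤ i - 1), if_neg (by simp [htest])]
        congr 1
        omega
      · have htest : (('a' ≤ c && c ≤ 'z') || c == '?' || c == '.' || c == '!') = true := by
          revert hok; unfold okChar
          cases (('a' ≤ c && c ≤ 'z') || c == '?' || c == '.' || c == '!') <;> simp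
        rw [if_neg (by simp [hok]), if_neg (by simp; omega : ¬ (i == 1) = true)]
        conv_rhs => rw [lastCapsAltLoop]
        rw [if_neg (by omega : ¬ 18 ≤ i - 1), if_pos htest]
        have hcast : ((i : Int) - 1) = ((i - 1 : Nat) : Int) := by omega
        rw [hcast]

theorem lastCaps_eq_alt (sentence : String) (h : 2 ≤ sentence.toList.length) :
    lastCapsLoop sentence.toList 1 = lastCaps_alt sentence := by
  rcases hrs : sentence.toList.reverse with _ | ⟨c0, cr⟩
  · exact absurd (List.reverse_eq_nil_iff.mp hrs) (by intro he; rw [he] at h; simp at h)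
  · have hs_eq : sentence.toList = cr.reverse ++ [c0] := by
      have := congrArg List.reverse hrs
      simpa using this
    have hdl : sentence.toList.dropLast.reverse = cr := by
      rw [hs_eq, List.dropLast_concat, List.reverse_reverse]
    have hget : PySem.List.pyGet? sentence.toList (-1) = some c0 := by
      rw [hs_eq]; exact PySem.List.pyGet?_neg_one_append_singleton _ _
    have hsuf : PySem.List.slice sentence.toList (some (-((1:Nat) : Int))) none = [c0] := by
      rw [slice_neg_eq_take_reverse _ 1 one_pos, hrs]; rfl
    rw [lastCapsLoop]
    rw [dif_pos ⟨by omega, by omega⟩]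
    simp only [show ((1:Nat) == 19) = false from rfl, Bool.false_eq_true, if_false]
    unfold lastCaps_alt
    simp only [if_neg (by omega : ¬ sentence.toList.length ≤ 1), hget, hdl]
    by_cases hup : ('A' ≤ c0 && c0 ≤ 'Z') = true
    · have hn : 65 ≤ c0.toNat ∧ c0.toNat ≤ 90 := by
        simpa [Char.le_def, UInt32.le_iff_toNat_le] using hup
      have hq : ('?' = c0) = False := by simp; rintro rfl; exact absurd hn (by decide)
      have hd : ('.' = c0) = False := by simp; rintro rfl; exact absurd hn (by decide)
      have he : ('!' = c0) = False := by simp; rintro rfl; exact absurd hn (by decide)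
      rw [if_pos]
      · rw [loop_eq sentence.toList c0 cr (by omega) hrs hup (19 - 2) 2 rfl (by omega) (by omega)
          (by simp)]
        rw [if_neg (by simp [hup])]
        norm_num
      · rw [hsuf]
        simp [pyStrIsupper, isIn_singleton, hq, hd, he, Char.le_def, UInt32.le_iff_toNat_le]
        omega
    · have hup' : ('A' ≤ c0 && c0 ≤ 'Z') = false := by
        cases hx : ('A' ≤ c0 && c0 ≤ 'Z') <;> simp_all
      rw [if_neg, if_pos (by simp [hup'])]
      · simp [hup']
      · rw [hsuf]
        simp [pyStrIsupper, hup']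

-- ===== VERDICT (by name: the statement is the Claim_ definition above) =====
theorem lastCaps_spec : Claim_equal_lastCaps := by
  intro sentence _ hpre
  unfold Spec_lastCaps
  exact lastCaps_eq_alt sentence hpre
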